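-- pv_equiv track=rewrite | github.com/X-Dynamite-X/python-cipher | en_vigener.py | ind_pl
-- ===== SOURCE A (Python) =====
-- letters = ["A","B","C","D","E","F","G","H","I","J","K","L","M","N","O","P","Q","R","S","T","U","V","W","X","Y","Z"]
--
-- def ind_pl(plain_text):
--     numper = []
--     x=0
--     for pl in plain_text:
--         x=0
--         for le in letters:
--
--             if le == pl:
--                 pl_index = x
--                 numper.append(pl_index)
--             x=x+1
--     return numper
-- ===== SOURCE B (Python) =====
-- def ind_pl(plain_text):
--     return [ord(pl) - 65 for pl in plain_text if len(pl) == 1 and 'A' <= pl <= 'Z']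
-- ===== Notes on version B (the rewrite author's own statement) =====
-- stated objective: idiomatic
-- what changed: Replaces the nested scan of a 26-entry letter table with a single list comprehension computing each index by ord arithmetic, guarded by a single-uppercase-character check.
import Mathlib
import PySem

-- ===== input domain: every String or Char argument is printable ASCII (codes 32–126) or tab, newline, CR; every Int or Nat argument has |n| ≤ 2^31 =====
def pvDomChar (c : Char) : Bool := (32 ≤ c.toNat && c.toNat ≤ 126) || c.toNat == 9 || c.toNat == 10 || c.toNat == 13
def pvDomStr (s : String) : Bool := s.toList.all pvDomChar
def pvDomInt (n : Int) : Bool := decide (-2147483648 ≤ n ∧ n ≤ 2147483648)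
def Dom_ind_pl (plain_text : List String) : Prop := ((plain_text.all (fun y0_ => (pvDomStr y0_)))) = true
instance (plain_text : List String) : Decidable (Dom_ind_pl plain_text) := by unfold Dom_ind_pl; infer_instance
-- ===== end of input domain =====

-- B computes each letter's index by character-code subtraction instead of scanning a 26-entry table (idiomatic rewrite; exact return-value equivalence).
-- ===== PORT A =====
def lettersA : List String := ["A","B","C","D","E","F","G","H","I","J","K","L","M","N","O","P","Q","R","S","T","U","V","W","X","Y","Z"]

def ind_pl (plain_text : List String) : List Int :=
  plain_text.foldl (fun numper pl =>
    (lettersA.foldl (fun (s : List Int × Int) le =>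
        if le = pl then (s.1 ++ [s.2], s.2 + 1) else (s.1, s.2 + 1)) (numper, 0)).1) []

-- ===== PORT B =====
def altStep (pl : String) : Option Int :=
  match pl.toList with
  | [c] => if 'A' ≤ c ∧ c ≤ 'Z' then some ((c.toNat : Int) - 65) else none
  | _ => none

def ind_pl_alt (plain_text : List String) : List Int :=
  plain_text.filterMap altStep


-- ===== PRECONDITION & SPEC =====
def Spec_ind_pl (plain_text : List String) (out : List Int) : Prop := out = ind_pl_alt plain_text
instance (plain_text : List String) (out : List Int) : Decidable (Spec_ind_pl plain_text out) := by unfold Spec_ind_pl; infer_instance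

-- ===== CLAIM (what is proved, stated in full; the proofs are below) =====
def Claim_equal_ind_pl : Prop := ∀ (plain_text : List String), Dom_ind_pl plain_text → Spec_ind_pl plain_text (ind_pl plain_text)

-- ===== LEMMAS AND PROOFS =====


lemma char_eq_of_toNat {c d : Char} (h : c.toNat = d.toNat) : c = d :=
  Char.ext (UInt32.toBitVec_inj.mp (BitVec.toNat_inj.mp h))

lemma step_eq (pl : String) (numper : List Int) :
    (lettersA.foldl (fun (s : List Int × Int) le =>
        if le = pl then (s.1 ++ [s.2], s.2 + 1) else (s.1, s.2 + 1)) (numper, 0)).1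
      = numper ++ (altStep pl).toList := by
  have key : ∀ s : String, (s = pl) ↔ (s.toList = pl.toList) :=
    fun s => ⟨fun e => e ▸ rfl, String.toList_inj.mp⟩
  cases h : pl.toList with
  | nil =>
      simp [lettersA, altStep, key, h]
  | cons c tail =>
    cases tail with
    | cons d t =>
        simp [lettersA, altStep, key, h]
    | nil =>
      by_cases hc : 'A' ≤ c ∧ c ≤ 'Z'
      · have hlo : 65 ≤ c.toNat := hc.1
        have hhi : c.toNat ≤ 90 := hc.2
        by_cases h0 : c = 'A'
        · have : pl = "A" := String.toList_inj.mp (by rw [h, h0]; decide); subst this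
          simp [lettersA, altStep]
        by_cases h1 : c = 'B'
        · have : pl = "B" := String.toList_inj.mp (by rw [h, h1]; decide); subst this
          simp [lettersA, altStep]
        by_cases h2 : c = 'C'
        · have : pl = "C" := String.toList_inj.mp (by rw [h, h2]; decide); subst this
          simp [lettersA, altStep]
        by_cases h3 : c = 'D'
        · have : pl = "D" := String.toList_inj.mp (by rw [h, h3]; decide); subst this
          simp [lettersA, altStep]
        by_cases h4 : c = 'E'
        · have : pl = "E" := String.toList_inj.mp (by rw [h, h4]; decide); subst this
          simp [lettersA, altStep]
        by_cases h5 : c = 'F'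
        · have : pl = "F" := String.toList_inj.mp (by rw [h, h5]; decide); subst this
          simp [lettersA, altStep]
        by_cases h6 : c = 'G'
        · have : pl = "G" := String.toList_inj.mp (by rw [h, h6]; decide); subst this
          simp [lettersA, altStep]
        by_cases h7 : c = 'H'
        · have : pl = "H" := String.toList_inj.mp (by rw [h, h7]; decide); subst this
          simp [lettersA, altStep]
        by_cases h8 : c = 'I'
        · have : pl = "I" := String.toList_inj.mp (by rw [h, h8]; decide); subst this
          simp [lettersA, altStep]
        by_cases h9 : c = 'J'
        · have : pl = "J" := String.toList_inj.mp (by rw [h, h9]; decide); subst this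
          simp [lettersA, altStep]
        by_cases h10 : c = 'K'
        · have : pl = "K" := String.toList_inj.mp (by rw [h, h10]; decide); subst this
          simp [lettersA, altStep]
        by_cases h11 : c = 'L'
        · have : pl = "L" := String.toList_inj.mp (by rw [h, h11]; decide); subst this
          simp [lettersA, altStep]
        by_cases h12 : c = 'M'
        · have : pl = "M" := String.toList_inj.mp (by rw [h, h12]; decide); subst this
          simp [lettersA, altStep]
        by_cases h13 : c = 'N'
        · have : pl = "N" := String.toList_inj.mp (by rw [h, h13]; decide); subst this
          simp [lettersA, altStep]
        by_cases h14 : c = 'O'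
        · have : pl = "O" := String.toList_inj.mp (by rw [h, h14]; decide); subst this
          simp [lettersA, altStep]
        by_cases h15 : c = 'P'
        · have : pl = "P" := String.toList_inj.mp (by rw [h, h15]; decide); subst this
          simp [lettersA, altStep]
        by_cases h16 : c = 'Q'
        · have : pl = "Q" := String.toList_inj.mp (by rw [h, h16]; decide); subst this
          simp [lettersA, altStep]
        by_cases h17 : c = 'R'
        · have : pl = "R" := String.toList_inj.mp (by rw [h, h17]; decide); subst this
          simp [lettersA, altStep]
        by_cases h18 : c = 'S'
        · have : pl = "S" := String.toList_inj.mp (by rw [h, h18]; decide); subst this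
          simp [lettersA, altStep]
        by_cases h19 : c = 'T'
        · have : pl = "T" := String.toList_inj.mp (by rw [h, h19]; decide); subst this
          simp [lettersA, altStep]
        by_cases h20 : c = 'U'
        · have : pl = "U" := String.toList_inj.mp (by rw [h, h20]; decide); subst this
          simp [lettersA, altStep]
        by_cases h21 : c = 'V'
        · have : pl = "V" := String.toList_inj.mp (by rw [h, h21]; decide); subst this
          simp [lettersA, altStep]
        by_cases h22 : c = 'W'
        · have : pl = "W" := String.toList_inj.mp (by rw [h, h22]; decide); subst this
          simp [lettersA, altStep]
        by_cases h23 : c = 'X'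
        · have : pl = "X" := String.toList_inj.mp (by rw [h, h23]; decide); subst this
          simp [lettersA, altStep]
        by_cases h24 : c = 'Y'
        · have : pl = "Y" := String.toList_inj.mp (by rw [h, h24]; decide); subst this
          simp [lettersA, altStep]
        by_cases h25 : c = 'Z'
        · have : pl = "Z" := String.toList_inj.mp (by rw [h, h25]; decide); subst this
          simp [lettersA, altStep]
        exfalso
        have t0 : c.toNat ≠ 65 := fun e => h0 (char_eq_of_toNat (by rw [e]; decide))
        have t1 : c.toNat ≠ 66 := fun e => h1 (char_eq_of_toNat (by rw [e]; decide))
        have t2 : c.toNat ≠ 67 := fun e => h2 (char_eq_of_toNat (by rw [e]; decide))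
        have t3 : c.toNat ≠ 68 := fun e => h3 (char_eq_of_toNat (by rw [e]; decide))
        have t4 : c.toNat ≠ 69 := fun e => h4 (char_eq_of_toNat (by rw [e]; decide))
        have t5 : c.toNat ≠ 70 := fun e => h5 (char_eq_of_toNat (by rw [e]; decide))
        have t6 : c.toNat ≠ 71 := fun e => h6 (char_eq_of_toNat (by rw [e]; decide))
        have t7 : c.toNat ≠ 72 := fun e => h7 (char_eq_of_toNat (by rw [e]; decide))
        have t8 : c.toNat ≠ 73 := fun e => h8 (char_eq_of_toNat (by rw [e]; decide))
        have t9 : c.toNat ≠ 74 := fun e => h9 (char_eq_of_toNat (by rw [e]; decide))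
        have t10 : c.toNat ≠ 75 := fun e => h10 (char_eq_of_toNat (by rw [e]; decide))
        have t11 : c.toNat ≠ 76 := fun e => h11 (char_eq_of_toNat (by rw [e]; decide))
        have t12 : c.toNat ≠ 77 := fun e => h12 (char_eq_of_toNat (by rw [e]; decide))
        have t13 : c.toNat ≠ 78 := fun e => h13 (char_eq_of_toNat (by rw [e]; decide))
        have t14 : c.toNat ≠ 79 := fun e => h14 (char_eq_of_toNat (by rw [e]; decide))
        have t15 : c.toNat ≠ 80 := fun e => h15 (char_eq_of_toNat (by rw [e]; decide))
        have t16 : c.toNat ≠ 81 := fun e => h16 (char_eq_of_toNat (by rw [e]; decide))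
        have t17 : c.toNat ≠ 82 := fun e => h17 (char_eq_of_toNat (by rw [e]; decide))
        have t18 : c.toNat ≠ 83 := fun e => h18 (char_eq_of_toNat (by rw [e]; decide))
        have t19 : c.toNat ≠ 84 := fun e => h19 (char_eq_of_toNat (by rw [e]; decide))
        have t20 : c.toNat ≠ 85 := fun e => h20 (char_eq_of_toNat (by rw [e]; decide))
        have t21 : c.toNat ≠ 86 := fun e => h21 (char_eq_of_toNat (by rw [e]; decide))
        have t22 : c.toNat ≠ 87 := fun e => h22 (char_eq_of_toNat (by rw [e]; decide))
        have t23 : c.toNat ≠ 88 := fun e => h23 (char_eq_of_toNat (by rw [e]; decide))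
        have t24 : c.toNat ≠ 89 := fun e => h24 (char_eq_of_toNat (by rw [e]; decide))
        have t25 : c.toNat ≠ 90 := fun e => h25 (char_eq_of_toNat (by rw [e]; decide))
        omega
      · have n0 : ¬ ('A' = c) := fun e => hc (by rw [← e]; exact ⟨by decide, by decide⟩)
        have n1 : ¬ ('B' = c) := fun e => hc (by rw [← e]; exact ⟨by decide, by decide⟩)
        have n2 : ¬ ('C' = c) := fun e => hc (by rw [← e]; exact ⟨by decide, by decide⟩)
        have n3 : ¬ ('D' = c) := fun e => hc (by rw [← e]; exact ⟨by decide, by decide⟩)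
        have n4 : ¬ ('E' = c) := fun e => hc (by rw [← e]; exact ⟨by decide, by decide⟩)
        have n5 : ¬ ('F' = c) := fun e => hc (by rw [← e]; exact ⟨by decide, by decide⟩)
        have n6 : ¬ ('G' = c) := fun e => hc (by rw [← e]; exact ⟨by decide, by decide⟩)
        have n7 : ¬ ('H' = c) := fun e => hc (by rw [← e]; exact ⟨by decide, by decide⟩)
        have n8 : ¬ ('I' = c) := fun e => hc (by rw [← e]; exact ⟨by decide, by decide⟩)
        have n9 : ¬ ('J' = c) := fun e => hc (by rw [← e]; exact ⟨by decide, by decide⟩)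
        have n10 : ¬ ('K' = c) := fun e => hc (by rw [← e]; exact ⟨by decide, by decide⟩)
        have n11 : ¬ ('L' = c) := fun e => hc (by rw [← e]; exact ⟨by decide, by decide⟩)
        have n12 : ¬ ('M' = c) := fun e => hc (by rw [← e]; exact ⟨by decide, by decide⟩)
        have n13 : ¬ ('N' = c) := fun e => hc (by rw [← e]; exact ⟨by decide, by decide⟩)
        have n14 : ¬ ('O' = c) := fun e => hc (by rw [← e]; exact ⟨by decide, by decide⟩)
        have n15 : ¬ ('P' = c) := fun e => hc (by rw [← e]; exact ⟨by decide, by decide⟩)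
        have n16 : ¬ ('Q' = c) := fun e => hc (by rw [← e]; exact ⟨by decide, by decide⟩)
        have n17 : ¬ ('R' = c) := fun e => hc (by rw [← e]; exact ⟨by decide, by decide⟩)
        have n18 : ¬ ('S' = c) := fun e => hc (by rw [← e]; exact ⟨by decide, by decide⟩)
        have n19 : ¬ ('T' = c) := fun e => hc (by rw [← e]; exact ⟨by decide, by decide⟩)
        have n20 : ¬ ('U' = c) := fun e => hc (by rw [← e]; exact ⟨by decide, by decide⟩)
        have n21 : ¬ ('V' = c) := fun e => hc (by rw [← e]; exact ⟨by decide, by decide⟩)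
        have n22 : ¬ ('W' = c) := fun e => hc (by rw [← e]; exact ⟨by decide, by decide⟩)
        have n23 : ¬ ('X' = c) := fun e => hc (by rw [← e]; exact ⟨by decide, by decide⟩)
        have n24 : ¬ ('Y' = c) := fun e => hc (by rw [← e]; exact ⟨by decide, by decide⟩)
        have n25 : ¬ ('Z' = c) := fun e => hc (by rw [← e]; exact ⟨by decide, by decide⟩)
        simp [lettersA, altStep, key, h, hc, n0, n1, n2, n3, n4, n5, n6, n7, n8, n9, n10, n11, n12,
          n13, n14, n15, n16, n17, n18, n19, n20, n21, n22, n23, n24, n25]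

lemma fold_eq (pt : List String) (numper : List Int) :
    pt.foldl (fun numper pl =>
      (lettersA.foldl (fun (s : List Int × Int) le =>
          if le = pl then (s.1 ++ [s.2], s.2 + 1) else (s.1, s.2 + 1)) (numper, 0)).1) numper
      = numper ++ pt.filterMap altStep := by
  induction pt generalizing numper with
  | nil => simp
  | cons pl rest ih =>
      rw [List.foldl_cons, step_eq, ih, List.filterMap_cons]
      cases altStep pl <;> simp

-- ===== VERDICT (by name: the statement is the Claim_ definition above) =====
theorem ind_pl_spec : Claim_equal_ind_pl := by
  intro pt _
  unfold Spec_ind_pl ind_pl ind_pl_alt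
  exact fold_eq pt []
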